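-- pv_equiv track=rewrite | github.com/BlueSkyAndSomeCurses/.dotfiles | .config/VSCodium/User/History/79c330c8/60TK.py | get_url_info
-- ===== SOURCE A (Python) =====
-- def get_url_info(visits: list, url: str):
--     """
--     Returns tuple with info about site, which title is passed
--     Function should return:
--     title - title of site with this url
--     last_visit_date - date of the last visit of this site, in format "yyyy-mm-dd"
--     last_visit_time - time of the last visit of this site, in format "hh:mm:ss.ms"
--     num_of_visits - how much time was this site visited
--     average_time - average time, spend on this site
--     :param visits: all visits in browser history
--     :param url: url of site to search
--     :return: (title, last_visit_date, last_visit_time, num_of_visits, average_time)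
--
--     >>> get_url_info([('https://www.google.com/=UTF-8', 'youtube\
-- 'youtube - Пошук Google', '2023-10-21', '14:26:54.304747', 1117989),\
-- ('https://www.math-anal.ys.com/?hl=uk&gl=UA', 'restricted-content',\
-- '2023-01-21', '14:26:55.421209', 1757275),\
-- ('https://www.math-anal.ys.com/?hl=uk&gl=UA', 'resticted-content',\
-- '2023-11-21', '14:26:55.421209', 757275)], 'https://www.math-anal.ys.com/?hl=uk&gl=UA')
--
--     """
--
--     output = []
--
--     for visit in visits:
--         if visit[0] == url:
--             output.append(visit[1])
--             output.append(visit[2])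
--             output.append(visit[3])
--             output.append(0)
--             output.append(0)
--             break
--
--     for visit in visits:
--         if visit[0] == url:
--             output[3] += 1
--             output[4] += visit[4]
--
--     output[4] //= output[3]
--
--     return tuple(output)
-- ===== SOURCE B (Python) =====
-- def get_url_info(visits: list, url: str):
--     output = []
--     for visit in visits:
--         if visit[0] == url:
--             if not output:
--                 output = [visit[1], visit[2], visit[3], 0, 0]
--             output[3] += 1
--             output[4] += visit[4]
--     output[4] //= output[3]
--     return tuple(output)
-- ===== Notes on version B (the rewrite author's own statement) =====
-- stated objective: simpler
-- what changed: Replaces A's two full passes (find-first-with-break, then count/sum) by one single pass that initialises the output on the first match and accumulates count and duration as it goes.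
import Mathlib
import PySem

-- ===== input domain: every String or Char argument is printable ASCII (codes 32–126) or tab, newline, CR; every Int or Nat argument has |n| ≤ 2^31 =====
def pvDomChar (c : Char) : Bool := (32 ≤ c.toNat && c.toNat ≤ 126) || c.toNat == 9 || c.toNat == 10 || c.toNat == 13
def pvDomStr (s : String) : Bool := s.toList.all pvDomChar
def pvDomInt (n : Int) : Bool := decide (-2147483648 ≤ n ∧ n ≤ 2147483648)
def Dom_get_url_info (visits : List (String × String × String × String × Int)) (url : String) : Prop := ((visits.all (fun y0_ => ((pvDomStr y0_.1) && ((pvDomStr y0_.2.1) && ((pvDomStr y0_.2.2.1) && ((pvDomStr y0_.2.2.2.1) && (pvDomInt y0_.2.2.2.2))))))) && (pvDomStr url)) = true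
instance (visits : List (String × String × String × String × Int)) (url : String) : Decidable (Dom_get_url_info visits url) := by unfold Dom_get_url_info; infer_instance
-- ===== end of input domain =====

-- ===== PORT A =====
-- B changes: one single pass instead of A's find-first-then-break pass plus a count/sum pass (objective: simpler).
-- Both Pythons raise IndexError when url never occurs in visits; Pre_ excludes exactly those inputs.
-- first loop of A: scan for the first visit with matching url, break (the appended [0,0] tail is the fold's start below)
def pvFindFirstA (url : String) : List (String × String × String × String × Int) → Option (String × String × String)
  | [] => none
  | v :: rest => if v.1 = url then some (v.2.1, v.2.2.1, v.2.2.2.1) else pvFindFirstA url rest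

def get_url_info (visits : List (String × String × String × String × Int)) (url : String) : String × String × String × Int × Int :=
  match pvFindFirstA url visits with
  | none => ("", "", "", 0, 0)   -- Python raises IndexError here; excluded by Pre_
  | some (t, d, ti) =>
    -- second loop of A: output[3] += 1; output[4] += visit[4]
    let cs := visits.foldl
      (fun (cs : Int × Int) v => if v.1 = url then (cs.1 + 1, cs.2 + v.2.2.2.2) else cs) (0, 0)
    (t, d, ti, cs.1, PySem.Int.floordiv cs.2 cs.1)   -- output[4] //= output[3]

-- ===== PORT B =====
def get_url_info_alt (visits : List (String × String × String × String × Int)) (url : String) : String × String × String × Int × Int :=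
  -- single loop: state none = "output == []", some = the output list's five fields
  let st := visits.foldl
    (fun (st : Option (String × String × String × Int × Int)) v =>
      if v.1 = url then
        match st with
        | none => some (v.2.1, v.2.2.1, v.2.2.2.1, 1, v.2.2.2.2)
        | some (t, d, ti, c, s) => some (t, d, ti, c + 1, s + v.2.2.2.2)
      else st) none
  match st with
  | none => ("", "", "", 0, 0)   -- Python raises IndexError here; excluded by Pre_
  | some (t, d, ti, c, s) => (t, d, ti, c, PySem.Int.floordiv s c)

-- ===== PRECONDITION & SPEC =====
-- Pre_: some visit has the searched url; otherwise both Pythons raise IndexError on output[3].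
def Pre_get_url_info (visits : List (String × String × String × String × Int)) (url : String) : Prop :=
  ∃ v ∈ visits, v.1 = url
instance (visits : List (String × String × String × String × Int)) (url : String) : Decidable (Pre_get_url_info visits url) := by unfold Pre_get_url_info; infer_instance
def pvWitness_get_url_info : (List (String × String × String × String × Int)) × String :=
  ([("u", "t", "2023-10-21", "14:26:54.3", 7)], "u")
def Spec_get_url_info (visits : List (String × String × String × String × Int)) (url : String) (out : String × String × String × Int × Int) : Prop := out = get_url_info_alt visits url
instance (visits : List (String × String × String × String × Int)) (url : String) (out : String × String × String × Int × Int) : Decidable (Spec_get_url_info visits url out) := by unfold Spec_get_url_info; infer_instance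

-- ===== CLAIM (what is proved, stated in full; the proofs are below) =====
def Claim_equal_get_url_info : Prop := ∀ (visits : List (String × String × String × String × Int)) (url : String), Dom_get_url_info visits url → Pre_get_url_info visits url → Spec_get_url_info visits url (get_url_info visits url)

-- ===== LEMMAS AND PROOFS =====

-- shifting the accumulator of A's count/sum fold
theorem foldA_shift (url : String) (visits : List (String × String × String × String × Int)) (c s : Int) :
    visits.foldl (fun (cs : Int × Int) v => if v.1 = url then (cs.1 + 1, cs.2 + v.2.2.2.2) else cs) (c, s)
      = (c + (visits.foldl (fun (cs : Int × Int) v => if v.1 = url then (cs.1 + 1, cs.2 + v.2.2.2.2) else cs) (0, 0)).1,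
         s + (visits.foldl (fun (cs : Int × Int) v => if v.1 = url then (cs.1 + 1, cs.2 + v.2.2.2.2) else cs) (0, 0)).2) := by
  induction visits generalizing c s with
  | nil => simp
  | cons v rest ih =>
    simp only [List.foldl_cons]
    by_cases h : v.1 = url
    · simp only [if_pos h]
      rw [ih (c + 1) (s + v.2.2.2.2), ih (0 + 1) (0 + v.2.2.2.2)]
      simp; constructor <;> ring
    · simp only [if_neg h]
      exact ih c s

-- B's fold run from a 'some' state only bumps the count and sum by A's count/sum fold
theorem foldB_some (url : String) (visits : List (String × String × String × String × Int))
    (t d ti : String) (c s : Int) :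
    visits.foldl (fun (st : Option (String × String × String × Int × Int)) v =>
        if v.1 = url then
          match st with
          | none => some (v.2.1, v.2.2.1, v.2.2.2.1, 1, v.2.2.2.2)
          | some (t, d, ti, c, s) => some (t, d, ti, c + 1, s + v.2.2.2.2)
        else st) (some (t, d, ti, c, s))
      = some (t, d, ti,
          c + (visits.foldl (fun (cs : Int × Int) v => if v.1 = url then (cs.1 + 1, cs.2 + v.2.2.2.2) else cs) (0, 0)).1,
          s + (visits.foldl (fun (cs : Int × Int) v => if v.1 = url then (cs.1 + 1, cs.2 + v.2.2.2.2) else cs) (0, 0)).2) := by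
  induction visits generalizing c s with
  | nil => simp
  | cons v rest ih =>
    simp only [List.foldl_cons]
    by_cases h : v.1 = url
    · simp only [if_pos h]
      rw [ih (c + 1) (s + v.2.2.2.2), foldA_shift url rest (0 + 1) (0 + v.2.2.2.2)]
      simp; constructor <;> ring
    · simp only [if_neg h]
      exact ih c s

-- B's fold from the empty state equals A's first-match fields paired with A's count/sum
theorem foldB_none (url : String) (visits : List (String × String × String × String × Int)) :
    visits.foldl (fun (st : Option (String × String × String × Int × Int)) v =>
        if v.1 = url then
          match st with
          | none => some (v.2.1, v.2.2.1, v.2.2.2.1, 1, v.2.2.2.2)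
          | some (t, d, ti, c, s) => some (t, d, ti, c + 1, s + v.2.2.2.2)
        else st) none
      = match pvFindFirstA url visits with
        | none => none
        | some (t, d, ti) => some (t, d, ti,
            (visits.foldl (fun (cs : Int × Int) v => if v.1 = url then (cs.1 + 1, cs.2 + v.2.2.2.2) else cs) (0, 0)).1,
            (visits.foldl (fun (cs : Int × Int) v => if v.1 = url then (cs.1 + 1, cs.2 + v.2.2.2.2) else cs) (0, 0)).2) := by
  induction visits with
  | nil => simp [pvFindFirstA]
  | cons v rest ih =>
    simp only [List.foldl_cons, pvFindFirstA]
    by_cases h : v.1 = url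
    · simp only [if_pos h]
      rw [foldB_some url rest, foldA_shift url rest (0 + 1) (0 + v.2.2.2.2)]
      simp
    · simp only [if_neg h]
      exact ih

-- ===== VERDICT (by name: the statement is the Claim_ definition above) =====
theorem get_url_info_spec : Claim_equal_get_url_info := by
  intro visits url _ _
  unfold Spec_get_url_info get_url_info get_url_info_alt
  rw [foldB_none url visits]
  cases h : pvFindFirstA url visits with
  | none => rfl
  | some x => rfl
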